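-- pv_equiv track=rewrite | github.com/tpoveda/tpPyUtils | string.py | camel_case_to_title
-- ===== SOURCE A (Python) =====
-- def camel_case_to_title(text):
--     """
--     Split string by upper case letters and return a nice name
--     :param text: str, string to convert
--     :return: str
--     """
--
--     words = list()
--     char_pos = 0
--     for curr_char_pos, char in enumerate(text):
--         if char.isupper() and char_pos < curr_char_pos:
--             words.append(text[char_pos:curr_char_pos].title())
--             char_pos = curr_char_pos
--     words.append(text[char_pos:].title())
--     return ' '.join(words)
-- ===== SOURCE B (Python) =====
-- def camel_case_to_title(text):
--     buf = []
--     for i, ch in enumerate(text):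
--         if i > 0 and ch.isupper():
--             buf.append(' ')
--         buf.append(ch)
--     return ''.join(buf).title()
-- ===== Notes on version B (the rewrite author's own statement) =====
-- stated objective: simpler
-- what changed: Instead of tracking slice positions and title-casing every carved-out segment separately, B makes one pass that inserts a space before each uppercase character (past position 0) into a single buffer and title-cases the joined string once.
import Mathlib
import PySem

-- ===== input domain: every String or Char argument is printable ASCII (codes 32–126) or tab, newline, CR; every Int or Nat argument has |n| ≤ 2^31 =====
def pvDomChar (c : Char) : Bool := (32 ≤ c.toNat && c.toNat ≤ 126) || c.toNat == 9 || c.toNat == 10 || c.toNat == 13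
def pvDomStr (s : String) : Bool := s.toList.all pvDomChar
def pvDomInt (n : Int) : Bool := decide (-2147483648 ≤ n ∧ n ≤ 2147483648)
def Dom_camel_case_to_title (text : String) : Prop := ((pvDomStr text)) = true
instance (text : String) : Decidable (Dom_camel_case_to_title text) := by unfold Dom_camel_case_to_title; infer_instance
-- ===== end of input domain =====

-- B builds the spaced buffer in one pass and title-cases the whole string once,
-- instead of A's slicing at each uppercase and title-casing every segment; objective: simpler.

-- ===== PORT A =====
-- hand port of str.title(): exact on the ASCII domain, where a character is cased iff it is a letter
def titleGo : Bool → List Char → List Char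
  | _, [] => []
  | prev, c :: cs =>
      (if PySem.Chars.isalpha c then (if prev then PySem.Chars.lowerChar c else PySem.Chars.upperChar c) else c)
        :: titleGo (PySem.Chars.isalpha c) cs

def titleChars (cs : List Char) : List Char := titleGo false cs

-- loop body of A: state = (words, char_pos)
def stepA (cs : List Char) (st : List (List Char) × Int) (p : Int × Char) : List (List Char) × Int :=
  if PySem.Chars.isupper p.2 && decide (st.2 < p.1) then
    (st.1 ++ [titleChars (PySem.List.slice cs (some st.2) (some p.1))], p.1)
  else st

def camel_case_to_title (text : String) : String :=
  let cs := text.toList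
  let st := (PySem.List.enumerate cs 0).foldl (stepA cs) ([], 0)
  let words := st.1 ++ [titleChars (PySem.List.slice cs (some st.2) none)]
  String.ofList (PySem.Chars.join [' '] words)

-- ===== PORT B =====
-- loop body of B: append ' ' before an uppercase char at position > 0, then the char
def stepB (acc : List Char) (p : Int × Char) : List Char :=
  acc ++ (if decide (0 < p.1) && PySem.Chars.isupper p.2 then [' ', p.2] else [p.2])

def camel_case_to_title_alt (text : String) : String :=
  let buf := (PySem.List.enumerate text.toList 0).foldl stepB []
  String.ofList (titleChars buf)

-- ===== PRECONDITION & SPEC =====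
def Spec_camel_case_to_title (text : String) (out : String) : Prop := out = camel_case_to_title_alt text
instance (text : String) (out : String) : Decidable (Spec_camel_case_to_title text out) := by unfold Spec_camel_case_to_title; infer_instance

-- ===== CLAIM (what is proved, stated in full; the proofs are below) =====
def Claim_equal_camel_case_to_title : Prop := ∀ (text : String), Dom_camel_case_to_title text → Spec_camel_case_to_title text (camel_case_to_title text)

-- ===== LEMMAS AND PROOFS =====

-- the segments A carves out: split before each uppercase letter once the current segment is nonempty
def collect : List Char → List Char → List (List Char)
  | cur, [] => [cur]
  | cur, c :: rest =>
      if PySem.Chars.isupper c && !cur.isEmpty then cur :: collect [c] rest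
      else collect (cur ++ [c]) rest

-- the buffer B appends for all positions ≥ 1
def tailBuf (rest : List Char) : List Char :=
  rest.flatMap (fun c => if PySem.Chars.isupper c then [' ', c] else [c])

-- state of the title() scan after a prefix
def endSt : Bool → List Char → Bool
  | prev, [] => prev
  | _, c :: cs => endSt (PySem.Chars.isalpha c) cs

theorem collect_ne_nil : ∀ (rest cur : List Char), collect cur rest ≠ [] := by
  intro rest
  induction rest with
  | nil => intro cur; simp [collect]
  | cons c rest ih =>
      intro cur
      by_cases h : PySem.Chars.isupper c && !cur.isEmpty <;> simp [collect, h, ih]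

theorem titleGo_append : ∀ (xs : List Char) (prev : Bool) (ys : List Char),
    titleGo prev (xs ++ ys) = titleGo prev xs ++ titleGo (endSt prev xs) ys := by
  intro xs
  induction xs with
  | nil => intro prev ys; simp [titleGo, endSt]
  | cons c xs ih => intro prev ys; simp [titleGo, endSt, ih]

theorem titleGo_space (prev : Bool) (t : List Char) :
    titleGo prev (' ' :: t) = ' ' :: titleGo false t := by
  simp [titleGo, show PySem.Chars.isalpha ' ' = false from by decide]

-- joining A's titled segments = title of B's buffer (for a nonempty current segment)
theorem join_collect : ∀ (rest cur : List Char), cur ≠ [] →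
    PySem.Chars.join [' '] ((collect cur rest).map titleChars) = titleGo false (cur ++ tailBuf rest) := by
  intro rest
  induction rest with
  | nil => intro cur _; simp [collect, tailBuf, PySem.Chars.join_singleton, titleChars]
  | cons c rest ih =>
      intro cur hcur
      by_cases hu : PySem.Chars.isupper c = true
      · have hem : cur.isEmpty = false := by
          simpa using hcur
        have hcond : (PySem.Chars.isupper c && !cur.isEmpty) = true := by
          rw [hu, hem]; rfl
        obtain ⟨a, l, hshape⟩ := List.exists_cons_of_ne_nil (collect_ne_nil rest [c])
        rw [collect, if_pos hcond]
        simp only [hshape]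
        simp only [List.map_cons]
        rw [PySem.Chars.join_cons_cons, ← List.map_cons, ← hshape, ih [c] (by simp)]
        have : tailBuf (c :: rest) = [' '] ++ ([c] ++ tailBuf rest) := by
          simp [tailBuf, hu]
        rw [this, titleGo_append cur false]
        simp only [List.singleton_append]
        rw [titleGo_space]
        simp [titleChars]
      · have hcond : (PySem.Chars.isupper c && !cur.isEmpty) = false := by simp [hu]
        rw [collect, if_neg (by simp [hcond])]
        rw [ih (cur ++ [c]) (by simp)]
        have : tailBuf (c :: rest) = [c] ++ tailBuf rest := by simp [tailBuf, hu]
        rw [this, List.append_assoc]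

-- invariant of A's fold: finishing from any intermediate state yields the titled segments
theorem A_inv (cs : List Char) : ∀ (rest : List Char) (ws : List (List Char)) (p j : Nat),
    p ≤ j → rest = cs.drop j →
    ((PySem.List.enumerate rest (j : Int)).foldl (stepA cs) (ws, (p : Int))).1
      ++ [titleChars (PySem.List.slice cs
            (some ((PySem.List.enumerate rest (j : Int)).foldl (stepA cs) (ws, (p : Int))).2) none)]
      = ws ++ (collect ((cs.drop p).take (j - p)) rest).map titleChars := by
  intro rest
  induction rest with
  | nil =>
      intro ws p j hpj hdrop
      have hlen : cs.length ≤ j := by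
        by_contra h
        have := List.drop_eq_nil_iff.mp hdrop.symm
        omega
      simp only [PySem.List.enumerate, List.foldl_nil, collect]
      have htake : (cs.drop p).take (j - p) = cs.drop p := by
        apply List.take_of_length_le
        simp; omega
      rw [htake, PySem.List.slice_from_natCast]
      simp
  | cons c rest ih =>
      intro ws p j hpj hdrop
      have hj : j < cs.length := by
        by_contra h
        have : cs.drop j = [] := List.drop_eq_nil_iff.mpr (by omega)
        rw [this] at hdrop; exact absurd hdrop (by simp)
      have hcj : cs[j]? = some c := by
        have h : (List.drop j cs)[0]? = some c := by rw [← hdrop]; rfl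
        simpa [List.getElem?_drop] using h
      have hrest : rest = cs.drop (j + 1) := by
        have : cs.drop (j+1) = (cs.drop j).drop 1 := by
          rw [List.drop_drop]
        rw [this, ← hdrop]; simp
      have hcur : (cs.drop p).take (j - p) ≠ [] ↔ p < j := by
        constructor
        · intro h
          by_contra hc
          have : p = j := by omega
          simp [this] at h
        · intro h
          simp only [ne_eq, List.take_eq_nil_iff, not_or]
          constructor
          · omega
          · simp only [List.drop_eq_nil_iff, not_le]; omega
      rw [PySem.List.enumerate_cons]
      simp only [List.foldl_cons]
      by_cases hcond : (PySem.Chars.isupper c && decide ((p : Int) < (j : Int))) = true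
      · have hplt : p < j := by
          have := (Bool.and_eq_true _ _).mp hcond
          exact_mod_cast of_decide_eq_true this.2
        have hstep : stepA cs (ws, (p : Int)) ((j : Int), c)
            = (ws ++ [titleChars (PySem.List.slice cs (some (p:Int)) (some (j:Int)))], (j : Int)) := by
          simp only [stepA]; rw [if_pos hcond]
        rw [hstep]
        rw [show ((j : Int) + 1) = ((j + 1 : Nat) : Int) from by push_cast; ring]
        rw [ih (ws ++ [titleChars (PySem.List.slice cs (some (p:Int)) (some (j:Int)))]) j (j+1) (by omega) hrest]
        have hne : (cs.drop p).take (j - p) ≠ [] := hcur.mpr hplt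
        have hem : ((cs.drop p).take (j - p)).isEmpty = false := by
          simp; omega
        have hc2 : (PySem.Chars.isupper c && !((cs.drop p).take (j - p)).isEmpty) = true := by
          rw [((Bool.and_eq_true _ _).mp hcond).1, hem]; rfl
        rw [collect, if_pos hc2]
        simp only [List.map_cons]
        have hseg : PySem.List.slice cs (some (p:Int)) (some (j:Int)) = (cs.drop p).take (j - p) :=
          PySem.List.slice_natCast cs p j
        have hnew : (cs.drop j).take (j + 1 - j) = [c] := by
          rw [← hdrop]
          simp
        rw [hseg, hnew]
        simp
      · have hstep : stepA cs (ws, (p : Int)) ((j : Int), c) = (ws, (p : Int)) := by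
          simp only [stepA]
          rw [if_neg (by simpa using hcond)]
        rw [hstep]
        rw [show ((j : Int) + 1) = ((j + 1 : Nat) : Int) from by push_cast; ring]
        rw [ih ws p (j+1) (by omega) hrest]
        have hext : (cs.drop p).take (j + 1 - p) = (cs.drop p).take (j - p) ++ [c] := by
          have h1 : j + 1 - p = (j - p) + 1 := by omega
          rw [h1, List.take_add_one]
          have : (cs.drop p)[j - p]? = some c := by
            rw [List.getElem?_drop]
            have : p + (j - p) = j := by omega
            rw [this, hcj]
          simp [this]
        have hc2 : (PySem.Chars.isupper c && !((cs.drop p).take (j - p)).isEmpty) = false := by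
          by_cases hu : PySem.Chars.isupper c = true
          · have hple : ¬ ((p : Int) < (j : Int)) := by
              intro h
              exact hcond (by simp [hu, h])
            have : ¬ p < j := by exact_mod_cast hple
            have hpj' : p = j := by omega
            simp [hu, hpj']
          · simp [hu]
        rw [collect, if_neg (by simp [hc2]), hext]
  
-- invariant of B's fold for positions ≥ 1
theorem B_inv : ∀ (rest : List Char) (acc : List Char) (j : Nat), 1 ≤ j →
    (PySem.List.enumerate rest (j : Int)).foldl stepB acc = acc ++ tailBuf rest := by
  intro rest
  induction rest with
  | nil => intro acc j _; simp [PySem.List.enumerate, tailBuf]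
  | cons c rest ih =>
      intro acc j hj
      rw [PySem.List.enumerate_cons, List.foldl_cons]
      have h0 : decide ((0 : Int) < (j : Int)) = true := by
        simp; omega
      have hstep : stepB acc ((j : Int), c)
          = acc ++ (if PySem.Chars.isupper c then [' ', c] else [c]) := by
        simp only [stepB, h0, Bool.true_and]
      rw [hstep]
      have : ((j : Int) + 1) = ((j + 1 : Nat) : Int) := by push_cast; ring
      rw [this, ih _ (j+1) (by omega)]
      simp [tailBuf]

-- ===== VERDICT (by name: the statement is the Claim_ definition above) =====
theorem camel_case_to_title_spec : Claim_equal_camel_case_to_title := by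
  intro text _
  unfold Spec_camel_case_to_title camel_case_to_title camel_case_to_title_alt
  have hA := A_inv text.toList text.toList [] 0 0 (by omega) (by simp)
  simp only [Nat.cast_zero, List.drop_zero, Nat.sub_zero, List.take_zero, List.nil_append] at hA
  cases hcs : text.toList with
  | nil =>
      simp [PySem.List.enumerate, PySem.List.slice, titleChars, titleGo,
        PySem.Chars.join_singleton]
  | cons c rest =>
      simp only [hcs] at hA ⊢
      rw [hA]
      rw [PySem.List.enumerate_cons, List.foldl_cons]
      have hstep : stepB [] ((0 : Int), c) = [c] := by
        simp [stepB]
      rw [hstep, show ((0:Int) + 1) = ((1 : Nat) : Int) from by norm_num, B_inv rest [c] 1 (by omega)]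
      have hcollect : collect [] (c :: rest) = collect [c] rest := by
        simp [collect]
      rw [hcollect, join_collect rest [c] (by simp)]
      simp [titleChars]
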